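-- pv_equiv track=rewrite | github.com/peter-gray-ward/Finance-Calendar-Angular-Spring | flaskr/calendar.py | Months
-- ===== SOURCE A (Python) =====
-- def Months(weeks):
--     months = []
--     week = []
--     first_sunday_found = False
--
--     for i in range(len(weeks)):
--         for day in weeks[i]:
--             if not first_sunday_found and day['day'] == 'Sunday':
--                 first_sunday_found = True
--
--             if first_sunday_found:
--                 week.append(day)
--
--             if len(week) == 7:
--                 months.append(week)
--                 week = []
--
--     if week:
--         months.append(week)
--
--     return months
-- ===== SOURCE B (Python) =====
-- def Months(weeks):
--     days = [day for w in weeks for day in w]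
--     start = next((i for i, d in enumerate(days) if d['day'] == 'Sunday'), None)
--     if start is None:
--         return []
--     days = days[start:]
--     months = []
--     i = 0
--     while i < len(days):
--         months.append(days[i:i+7])
--         i += 7
--     return months
-- ===== Notes on version B (the rewrite author's own statement) =====
-- stated objective: alternative
-- what changed: Replaces the stateful single pass with a 7-counter and found-flag by two explicit phases: flatten all weeks, locate the first Sunday's index, then chunk the suffix into consecutive slices of 7.
import Mathlib
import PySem

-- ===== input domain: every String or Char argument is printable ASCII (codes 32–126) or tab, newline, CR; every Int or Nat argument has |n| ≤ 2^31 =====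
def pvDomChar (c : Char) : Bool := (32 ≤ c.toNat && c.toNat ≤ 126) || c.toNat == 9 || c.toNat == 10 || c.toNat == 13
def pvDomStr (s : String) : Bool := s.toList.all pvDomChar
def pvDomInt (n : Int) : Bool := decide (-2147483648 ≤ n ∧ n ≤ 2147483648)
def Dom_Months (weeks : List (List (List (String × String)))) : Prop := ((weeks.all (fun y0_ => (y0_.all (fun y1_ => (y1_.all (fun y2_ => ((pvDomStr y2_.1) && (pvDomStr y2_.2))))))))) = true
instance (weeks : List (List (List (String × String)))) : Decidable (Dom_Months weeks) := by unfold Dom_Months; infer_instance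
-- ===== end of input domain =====

-- B replaces A's stateful single pass (found-flag + 7-counter) by two explicit phases:
-- flatten, find the first Sunday's index, then chunk the suffix into slices of 7. Objective: alternative.


-- ===== PORT A =====
-- day['day'] on the association list: first match (List.lookup), exact for a Python dict.
-- Loop state (months, week, first_sunday_found); each day updates it exactly as A's loop body does.
def MStep (st : List (List (List (String × String))) × List (List (String × String)) × Bool)
    (day : List (String × String)) :
    List (List (List (String × String))) × List (List (String × String)) × Bool :=
  let found := st.2.2 || (List.lookup "day" day == some "Sunday")
  let week := if found then st.2.1 ++ [day] else st.2.1
  if week.length = 7 then (st.1 ++ [week], [], found) else (st.1, week, found)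

def Months (weeks : List (List (List (String × String)))) : List (List (List (String × String))) :=
  let st := weeks.foldl (fun st wk => wk.foldl MStep st) ([], [], false)
  if st.2.1 ≠ [] then st.1 ++ [st.2.1] else st.1

-- ===== PORT B =====
-- while i < len(days): append days[i:i+7]; i += 7 — the obvious recursion on the index.
def chunksFrom (ds : List (List (String × String))) (i : Nat) : List (List (List (String × String))) :=
  if i < ds.length then PySem.List.slice ds (some (i : Int)) (some ((i : Int) + 7)) :: chunksFrom ds (i + 7)
  else []
termination_by ds.length - i

def Months_alt (weeks : List (List (List (String × String)))) : List (List (List (String × String))) :=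
  let days := weeks.flatten
  match days.findIdx? (fun d => List.lookup "day" d == some "Sunday") with
  | none => []
  | some start => chunksFrom (days.drop start) 0   -- days[start:] then chunk

-- ===== PRECONDITION & SPEC =====
-- Pre_ excludes exactly the inputs where Python A raises KeyError: a day missing the key 'day'
-- occurring (in flattened order) before the first Sunday day; B raises KeyError there too.
def Pre_Months (weeks : List (List (List (String × String)))) : Prop :=
  ((weeks.flatten.takeWhile (fun d => !(List.lookup "day" d == some "Sunday"))).all
    (fun d => (List.lookup "day" d).isSome)) = true

instance (weeks : List (List (List (String × String)))) : Decidable (Pre_Months weeks) := by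
  unfold Pre_Months; infer_instance

def pvWitness_Months : (List (List (List (String × String)))) :=
  [[[("day", "Sunday")], [("day", "Monday")]], [[("day", "Tuesday")]]]

def Spec_Months (weeks : List (List (List (String × String)))) (out : List (List (List (String × String)))) : Prop := out = Months_alt weeks
instance (weeks : List (List (List (String × String)))) (out : List (List (List (String × String)))) : Decidable (Spec_Months weeks out) := by unfold Spec_Months; infer_instance

-- ===== CLAIM (what is proved, stated in full; the proofs are below) =====
def Claim_equal_Months : Prop := ∀ (weeks : List (List (List (String × String)))), Dom_Months weeks → Pre_Months weeks → Spec_Months weeks (Months weeks)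

-- ===== LEMMAS AND PROOFS =====

-- chunking as structural recursion (proof helper)
def C7 : List (List (String × String)) → List (List (List (String × String)))
  | [] => []
  | d :: ds => ((d :: ds).take 7) :: C7 ((d :: ds).drop 7)
termination_by l => l.length
decreasing_by simp

theorem C7_cons (x : List (List (String × String))) (h : x ≠ []) :
    C7 x = x.take 7 :: C7 (x.drop 7) := by
  cases x with
  | nil => exact absurd rfl h
  | cons d ds => rw [C7]

theorem chunksFrom_eq_C7 (ds : List (List (String × String))) (i : Nat) :
    chunksFrom ds i = C7 (ds.drop i) := by
  fun_induction chunksFrom ds i with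
  | case1 i h ih =>
    have hne : ds.drop i ≠ [] := by
      simp only [ne_eq, List.drop_eq_nil_iff]; omega
    rw [C7_cons _ hne, ih]
    have h7 : ((i : Int) + 7) = ((i : Int) + ((7 : Nat) : Int)) := by norm_cast
    rw [h7, PySem.List.slice_natCast_add, List.drop_drop]
  | case2 i h =>
    have : ds.drop i = [] := by
      simp only [List.drop_eq_nil_iff]; omega
    rw [this, C7]

-- the found-phase invariant of A's fold
theorem foldl_MStep_found (l : List (List (String × String)))
    (m : List (List (List (String × String)))) (w : List (List (String × String)))
    (hw : w.length < 7) :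
    (let st := l.foldl MStep (m, w, true)
     if st.2.1 ≠ [] then st.1 ++ [st.2.1] else st.1) = m ++ C7 (w ++ l) := by
  induction l generalizing m w with
  | nil =>
    cases w with
    | nil => simp [C7]
    | cons d ds =>
      have ht : (d :: ds).take 7 = d :: ds := List.take_of_length_le (by omega)
      have hd : (d :: ds).drop 7 = [] := by
        simp only [List.drop_eq_nil_iff]; omega
      simp [C7, ht, hd]
  | cons d l ih =>
    simp only [List.foldl_cons]
    by_cases h7 : w.length + 1 = 7
    · have hstep : MStep (m, w, true) d = (m ++ [w ++ [d]], [], true) := by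
        simp [MStep, h7]
      rw [hstep, ih _ _ (by simp), List.nil_append]
      have hx : w ++ d :: l = (w ++ [d]) ++ l := by simp
      have hlen : (w ++ [d]).length = 7 := by simp [h7]
      have ht : ((w ++ [d]) ++ l).take 7 = w ++ [d] := by
        rw [List.take_append_of_le_length (by omega), List.take_of_length_le (by omega)]
      have hdr : ((w ++ [d]) ++ l).drop 7 = l := by
        rw [List.drop_append_of_le_length (by omega)]
        have : (w ++ [d]).drop 7 = [] := by
          simp only [List.drop_eq_nil_iff]; omega
        rw [this, List.nil_append]
      rw [hx, C7_cons (w ++ [d] ++ l) (by simp), ht, hdr]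
      simp
    · have hstep : MStep (m, w, true) d = (m, w ++ [d], true) := by
        simp [MStep, h7]
      rw [hstep, ih _ _ (by simp; omega)]
      simp

theorem months_eq_on_flat (ds : List (List (String × String))) :
    (let st := ds.foldl MStep ([], [], false)
     if st.2.1 ≠ [] then st.1 ++ [st.2.1] else st.1) =
    (match ds.findIdx? (fun d => List.lookup "day" d == some "Sunday") with
     | none => []
     | some start => C7 (ds.drop start)) := by
  induction ds with
  | nil => simp
  | cons d ds ih =>
    by_cases hs : (List.lookup "day" d == some "Sunday") = true
    · have hstep : MStep ([], [], false) d = ([], [d], true) := by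
        simp [MStep, hs]
      simp only [List.foldl_cons, hstep, List.findIdx?_cons, hs, if_pos]
      have := foldl_MStep_found ds [] [d] (by simp)
      simpa using this
    · have hstep : MStep ([], [], false) d = ([], [], false) := by
        simp [MStep, hs]
      simp only [List.foldl_cons, hstep, List.findIdx?_cons, hs, if_neg, Bool.false_eq_true,
        not_false_iff]
      rw [ih]
      cases h : ds.findIdx? (fun d => List.lookup "day" d == some "Sunday") with
      | none => simp
      | some j => simp

-- ===== VERDICT (by name: the statement is the Claim_ definition above) =====
theorem Months_spec : Claim_equal_Months := by
  intro weeks _ _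
  unfold Spec_Months Months Months_alt
  rw [show (weeks.foldl (fun st wk => wk.foldl MStep st) ([], [], false))
        = (weeks.flatten.foldl MStep ([], [], false)) from (List.foldl_flatten ..).symm]
  have := months_eq_on_flat weeks.flatten
  simp only at this
  rw [this]
  cases h : weeks.flatten.findIdx? (fun d => List.lookup "day" d == some "Sunday") with
  | none => simp only [h]
  | some start => simp only [h]; rw [chunksFrom_eq_C7, List.drop_zero]
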